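-- pv_equiv track=rewrite | github.com/cienco/mcp-server-motherduck | src/mcp_server_motherduck/server.py | _placeholder_count
-- ===== SOURCE A (Python) =====
-- def _placeholder_count(sql: str) -> int:
--     n = 0
--     in_s = False
--     esc = False
--     for ch in sql:
--         if in_s:
--             if esc:
--                 esc = False
--             elif ch == "\\":
--                 esc = True
--             elif ch == "'":
--                 in_s = False
--         else:
--             if ch == "'":
--                 in_s = True
--             elif ch == "?":
--                 n += 1
--     return n
-- ===== SOURCE B (Python) =====
-- def _placeholder_count(sql: str) -> int:
--     n = 0
--     rest = sql
--     while True: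
--         before, quote, rest = rest.partition("'")
--         n += before.count("?")
--         if not quote:
--             return n
--         # skip to the end of the string literal (backslash escapes a char)
--         i = 0
--         while i < len(rest):
--             c = rest[i]
--             if c == "\\":
--                 i += 2
--             elif c == "'":
--                 i += 1
--                 break
--             else:
--                 i += 1
--         rest = rest[i:]
-- ===== Notes on version B (the rewrite author's own statement) =====
-- stated objective: faster
-- what changed: Replaces the per-character state machine with in_s/esc flags by repeated str.partition at the next quote plus str.count of the placeholder character in the chunk before it, with an index jump over each literal body; the C-level partition/count calls replace the Python-level per-character loop.
import Mathlib
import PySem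

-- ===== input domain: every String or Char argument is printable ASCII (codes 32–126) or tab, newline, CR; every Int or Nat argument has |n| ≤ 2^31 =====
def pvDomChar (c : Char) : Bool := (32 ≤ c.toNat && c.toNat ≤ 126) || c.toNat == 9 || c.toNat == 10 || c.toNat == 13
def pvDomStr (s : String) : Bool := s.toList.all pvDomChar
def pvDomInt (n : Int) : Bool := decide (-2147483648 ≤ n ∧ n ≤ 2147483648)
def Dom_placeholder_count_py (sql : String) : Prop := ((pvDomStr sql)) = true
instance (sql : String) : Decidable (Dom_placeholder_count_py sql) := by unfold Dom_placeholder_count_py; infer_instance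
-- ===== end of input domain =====

-- B replaces A's per-character state machine (in_s/esc flags) by partitioning at
-- the next quote, counting placeholders in the chunk before it and skipping the
-- literal body; objective: faster by a constant factor (measured by the check).

-- ===== PORT A =====
-- A's for loop over sql with its state (n, in_s, esc), as structural recursion
def pvALoop : List Char → Int → Bool → Bool → Int
  | [], n, _, _ => n
  | ch :: rest, n, in_s, esc =>
    if in_s then
      if esc then pvALoop rest n in_s false
      else if ch = '\\' then pvALoop rest n in_s true
      else if ch = '\'' then pvALoop rest n false esc
      else pvALoop rest n in_s esc
    else
      if ch = '\'' then pvALoop rest n true esc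
      else if ch = '?' then pvALoop rest (n + 1) in_s esc
      else pvALoop rest n in_s esc

def placeholder_count_py (sql : String) : Int := pvALoop sql.toList 0 false false

-- ===== PORT B =====
-- Source B's inner while loop: skip past the body of a string literal
-- (a backslash consumes the next char), returning the suffix after it
def pvSkipLit : List Char → List Char
  | [] => []
  | c :: rest =>
    if c = '\\' then
      match rest with
      | [] => []
      | _ :: r => pvSkipLit r
    else if c = '\'' then rest
    else pvSkipLit rest

-- equation lemmas and a length bound, needed by pvBLoop's termination proof
theorem pvSkipLit_bs (x : Char) (t : List Char) : pvSkipLit ('\\' :: x :: t) = pvSkipLit t := by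
  rw [pvSkipLit.eq_def]; simp
theorem pvSkipLit_quote (t : List Char) : pvSkipLit ('\'' :: t) = t := by
  rw [pvSkipLit.eq_def]; simp
theorem pvSkipLit_other (c : Char) (t : List Char) (h1 : c ≠ '\\') (h2 : c ≠ '\'') :
    pvSkipLit (c :: t) = pvSkipLit t := by
  rw [pvSkipLit.eq_def]; simp [h1, h2]

theorem pvSkipLit_length_le (l : List Char) : (pvSkipLit l).length ≤ l.length := by
  have H : ∀ k, ∀ l : List Char, l.length ≤ k → (pvSkipLit l).length ≤ l.length := by
    intro k
    induction k with
    | zero =>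
      intro l hl
      have : l = [] := List.eq_nil_of_length_eq_zero (Nat.le_zero.mp hl)
      subst this; simp [pvSkipLit]
    | succ k ih =>
      intro l hl
      cases l with
      | nil => simp [pvSkipLit]
      | cons c t =>
        by_cases hb : c = '\\'
        · subst hb
          cases t with
          | nil => simp [pvSkipLit]
          | cons x r =>
            rw [pvSkipLit_bs]
            have := ih r (by simp at hl; omega)
            simp; omega
        · by_cases hq : c = '\''
          · subst hq; rw [pvSkipLit_quote]; simp
          · rw [pvSkipLit_other c t hb hq]
            have := ih t (by simp at hl; omega)
            simp; omega
  exact H l.length l (Nat.le_refl _)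

-- Source B's outer while loop: partition at the next quote (takeWhile/dropWhile),
-- count '?' in the chunk before it, skip the literal, continue on the suffix
def pvBLoop (l : List Char) : Int :=
  let before := l.takeWhile (· ≠ '\'')
  let after := l.dropWhile (· ≠ '\'')
  let n : Int := (before.count '?' : Nat)
  if after.isEmpty then n
  else n + pvBLoop (pvSkipLit after.tail)
termination_by l.length
decreasing_by
  have h1 : (l.dropWhile (· ≠ '\'')).length ≤ l.length := List.length_dropWhile_le _ _
  have h2 : ¬ (l.dropWhile (· ≠ '\'')).isEmpty := by assumption
  have h3 : 0 < (l.dropWhile (· ≠ '\'')).length := by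
    cases h : l.dropWhile (· ≠ '\'') with
    | nil => rw [h] at h2; simp at h2
    | cons a b => simp
  have h4 := pvSkipLit_length_le (l.dropWhile (· ≠ '\'')).tail
  have h5 : (l.dropWhile (· ≠ '\'')).tail.length = (l.dropWhile (· ≠ '\'')).length - 1 :=
    List.length_tail
  omega

def placeholder_count_py_alt (sql : String) : Int := pvBLoop sql.toList

-- ===== PRECONDITION & SPEC =====
def Spec_placeholder_count_py (sql : String) (out : Int) : Prop := out = placeholder_count_py_alt sql
instance (sql : String) (out : Int) : Decidable (Spec_placeholder_count_py sql out) := by unfold Spec_placeholder_count_py; infer_instance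

-- ===== CLAIM (what is proved, stated in full; the proofs are below) =====
def Claim_equal_placeholder_count_py : Prop := ∀ (sql : String), Dom_placeholder_count_py sql → Spec_placeholder_count_py sql (placeholder_count_py sql)

-- ===== LEMMAS AND PROOFS =====

theorem pvBLoop_nil : pvBLoop [] = 0 := by
  rw [pvBLoop]; simp

theorem pvBLoop_quote (t : List Char) : pvBLoop ('\'' :: t) = pvBLoop (pvSkipLit t) := by
  rw [pvBLoop]; simp

theorem pvBLoop_other (c : Char) (t : List Char) (hc : c ≠ '\'') :
    pvBLoop (c :: t) = (if c = '?' then 1 else 0) + pvBLoop t := by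
  rw [pvBLoop]
  conv_rhs => rw [pvBLoop]
  simp only [List.takeWhile_cons, List.dropWhile_cons, ne_eq, hc, not_false_iff, decide_true,
    if_true, List.count_cons]
  split_ifs with h1 h2 h2 <;> push_cast <;> simp_all <;> ring

-- the loop invariant: A's fold outside a literal computes n + B's count of the
-- rest; inside a literal (esc clear) it computes n + B's count after the skip
theorem pvKey : ∀ k : Nat, ∀ l : List Char, l.length ≤ k →
    (∀ n : Int, pvALoop l n false false = n + pvBLoop l) ∧
    (∀ n : Int, pvALoop l n true false = n + pvBLoop (pvSkipLit l)) := by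
  intro k
  induction k with
  | zero =>
    intro l hl
    have : l = [] := List.eq_nil_of_length_eq_zero (Nat.le_zero.mp hl)
    subst this
    simp [pvALoop, pvBLoop_nil, pvSkipLit]
  | succ k ih =>
    intro l hl
    cases l with
    | nil => simp [pvALoop, pvBLoop_nil, pvSkipLit]
    | cons c t =>
      have ht : t.length ≤ k := by simp at hl; omega
      constructor
      · intro n
        by_cases hq : c = '\''
        · subst hq
          simp only [pvALoop, Bool.false_eq_true, if_false, if_pos rfl]
          rw [(ih t ht).2 n, pvBLoop_quote]
          simp
        · rw [pvBLoop_other c t hq]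
          simp only [pvALoop, Bool.false_eq_true, if_false, if_neg hq]
          split_ifs with h2
          · rw [(ih t ht).1 (n + 1)]; ring
          · rw [(ih t ht).1 n]; ring
      · intro n
        by_cases hb : c = '\\'
        · subst hb
          cases t with
          | nil => simp [pvALoop, pvSkipLit, pvBLoop_nil]
          | cons x r =>
            have hr : r.length ≤ k := by simp at hl; omega
            simp only [pvALoop, if_pos rfl, if_pos trivial]
            rw [(ih r hr).2 n, pvSkipLit_bs]
            simp
        · by_cases hq : c = '\''
          · subst hq
            simp only [pvALoop, if_pos trivial, Bool.false_eq_true, if_false,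
              if_neg (by decide : ¬('\'' = '\\')), if_pos rfl]
            rw [(ih t ht).1 n, pvSkipLit_quote]
          · simp only [pvALoop, if_pos trivial, Bool.false_eq_true, if_false,
              if_neg hb, if_neg hq]
            rw [(ih t ht).2 n, pvSkipLit_other c t hb hq]

-- ===== VERDICT (by name: the statement is the Claim_ definition above) =====
theorem placeholder_count_py_spec : Claim_equal_placeholder_count_py := by
  intro sql _
  unfold Spec_placeholder_count_py placeholder_count_py placeholder_count_py_alt
  simpa using (pvKey sql.toList.length sql.toList (Nat.le_refl _)).1 0
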